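-- pv_equiv track=rewrite | github.com/nunit/nunit | .github/actions/test-reporter/parse_trx.py | dedupe_repeated_sequence
-- ===== SOURCE A (Python) =====
-- def dedupe_repeated_sequence(items):
--     """
--     If the whole list is N>=2 copies of the same block and the block has length>=2,
--     return one copy. Used when list items compare equal as strings.
--     """
--     n = len(items)
--     if n < 4:
--         return items
--     for period in range(2, n // 2 + 1):
--         if n % period != 0:
--             continue
--         block = items[:period]
--         if all(items[i] == block[i % period] for i in range(n)):
--             return list(block)
--     return items
-- ===== SOURCE B (Python) =====
-- def dedupe_repeated_sequence(items):
--     """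
--     If the whole list is N>=2 copies of the same block and the block has length>=2,
--     return one copy. B first finds the smallest period p of the whole list (smallest
--     p such that items[i] == items[i+p] for all valid i), then fixes it up
--     arithmetically: if p == 1 (all items equal) the answer block is the smallest
--     divisor of n in [2, n//2]; otherwise p itself is the answer iff it divides n
--     and n//p >= 2.
--     """
--     n = len(items)
--     if n < 4:
--         return items
--     p = 1
--     while p < n:
--         for i in range(n - p):
--             if items[i] != items[i + p]:
--                 break
--         else:
--             break  # p is a period
--         p += 1
--     if p == 1:
--         p = next((d for d in range(2, n // 2 + 1) if n % d == 0), n)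
--     if n % p == 0 and p <= n // 2:
--         return items[:p]
--     return items
-- ===== Notes on version B (the rewrite author's own statement) =====
-- stated objective: alternative
-- what changed: A scans every candidate divisor of n and re-verifies the whole list against the block by modular indexing; B instead computes the smallest period of the list once via an early-exit self-overlap scan (items[i] == items[i+p]) and then decides arithmetically (divisibility, smallest divisor when all items are equal) which block to return, justified by the Fine-and-Wilf periodicity argument proved in the Lean file.
import Mathlib
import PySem

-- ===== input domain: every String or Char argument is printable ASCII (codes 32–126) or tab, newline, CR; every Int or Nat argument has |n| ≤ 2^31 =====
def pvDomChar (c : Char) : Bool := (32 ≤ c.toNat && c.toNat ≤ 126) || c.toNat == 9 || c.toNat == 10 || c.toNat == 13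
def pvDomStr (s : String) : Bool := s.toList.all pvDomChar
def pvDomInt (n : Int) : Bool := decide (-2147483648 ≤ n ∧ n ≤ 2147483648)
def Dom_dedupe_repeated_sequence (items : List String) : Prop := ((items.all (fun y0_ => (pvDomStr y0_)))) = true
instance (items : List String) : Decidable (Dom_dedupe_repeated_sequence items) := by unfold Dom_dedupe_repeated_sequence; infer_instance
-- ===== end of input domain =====

-- B replaces A's scan over all divisor-length candidate blocks by one smallest-period
-- computation (self-overlap test) plus an arithmetic fix-up (alternative algorithm, same result).

-- ===== PORT A =====
-- all(items[i] == block[i % period] for i in range(n)), with block = items[:period]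
def pvCheckA (items : List String) (n q : Nat) : Bool :=
  (List.range n).all (fun i =>
    PySem.List.pyGet? items (i : Int) ==
      PySem.List.pyGet? (PySem.List.slice items none (some (q : Int))) ((i % q : Nat) : Int))

-- the 'for period in range(2, n//2+1)' loop, returning the first block found
def pvAFind (items : List String) (n : Nat) : List Nat → Option (List String)
  | [] => none
  | q :: rest =>
    if n % q ≠ 0 then pvAFind items n rest
    else if pvCheckA items n q then some (PySem.List.slice items none (some (q : Int)))
    else pvAFind items n rest

def dedupe_repeated_sequence (items : List String) : List String :=
  let n := items.length
  if n < 4 then items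
  else
    match pvAFind items n (List.range' 2 (n / 2 + 1 - 2)) with
    | some b => b
    | none => items

-- ===== PORT B =====
-- the inner 'for i in range(n - p): if items[i] != items[i + p]: break / else: break'
-- (the for/else succeeds iff every comparison agrees; List.all is the same early-exit scan)
def pvCheckB (items : List String) (n p : Nat) : Bool :=
  (List.range (n - p)).all (fun i =>
    PySem.List.pyGet? items (i : Int) == PySem.List.pyGet? items ((i + p : Nat) : Int))

-- while p < n: <inner scan>; if it succeeded break, else p += 1
def pvBMinPer (items : List String) (n p : Nat) : Nat :=
  if h : p < n ∧ ¬ pvCheckB items n p = true then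
    pvBMinPer items n (p + 1)
  else p
termination_by n - p
decreasing_by omega

-- next((d for d in range(2, n//2+1) if n % d == 0), n)
def pvBSmallDiv (n : Nat) : List Nat → Nat
  | [] => n
  | d :: rest => if n % d == 0 then d else pvBSmallDiv n rest

def dedupe_repeated_sequence_alt (items : List String) : List String :=
  let n := items.length
  if n < 4 then items
  else
    let p := pvBMinPer items n 1
    let p2 := if p == 1 then pvBSmallDiv n (List.range' 2 (n / 2 + 1 - 2)) else p
    if n % p2 == 0 && decide (p2 ≤ n / 2) then PySem.List.slice items none (some (p2 : Int))
    else items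

-- ===== PRECONDITION & SPEC =====
def Spec_dedupe_repeated_sequence (items : List String) (out : List String) : Prop := out = dedupe_repeated_sequence_alt items
instance (items : List String) (out : List String) : Decidable (Spec_dedupe_repeated_sequence items out) := by unfold Spec_dedupe_repeated_sequence; infer_instance

-- ===== CLAIM (what is proved, stated in full; the proofs are below) =====
def Claim_equal_dedupe_repeated_sequence : Prop := ∀ (items : List String), Dom_dedupe_repeated_sequence items → Spec_dedupe_repeated_sequence items (dedupe_repeated_sequence items)

-- ===== LEMMAS AND PROOFS =====

-- The overlap scan in B is exactly "p is a period".
theorem pvCheckB_iff_hasPeriod (w : List String) (p : Nat) :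
    pvCheckB w w.length p = true ↔ List.HasPeriod w p := by
  rw [List.hasPeriod_iff_getElem?]
  unfold pvCheckB
  rw [List.all_eq_true]
  constructor
  · intro h i hi
    have := h i (List.mem_range.mpr hi)
    rwa [PySem.List.pyGet?_natCast, PySem.List.pyGet?_natCast, beq_iff_eq] at this
  · intro h i hi
    rw [PySem.List.pyGet?_natCast, PySem.List.pyGet?_natCast, beq_iff_eq]
    exact h i (List.mem_range.mp hi)

-- A's modular block check is exactly "q is a period" (the block is items[:q], 1 ≤ q).
theorem pvCheckA_iff_hasPeriod (w : List String) (q : Nat) (hq : 1 ≤ q) :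
    pvCheckA w w.length q = true ↔ List.HasPeriod w q := by
  rw [List.hasPeriod_iff_forall_getElem?_mod]
  unfold pvCheckA
  rw [List.all_eq_true]
  constructor
  · intro h i hi
    have := h i (List.mem_range.mpr hi)
    rw [PySem.List.pyGet?_natCast, PySem.List.pyGet?_natCast,
      PySem.List.slice_to_natCast, beq_iff_eq] at this
    rw [this]
    simp [Nat.mod_lt i (show 0 < q by omega)]
  · intro h i hi
    have hi' := List.mem_range.mp hi
    rw [PySem.List.pyGet?_natCast, PySem.List.pyGet?_natCast,
      PySem.List.slice_to_natCast, beq_iff_eq, h i hi']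
    simp [Nat.mod_lt i (show 0 < q by omega)]

-- A list with period 1 has every period.
theorem pvHasPeriod_one_all (w : List String) (h : List.HasPeriod w 1) (q : Nat) :
    List.HasPeriod w q := by
  rw [List.hasPeriod_iff_forall_getElem?_mod] at h ⊢
  intro i hi
  have h1 := h i hi
  have h2 := h (i % q) (lt_of_le_of_lt (Nat.mod_le i q) hi)
  simp only [Nat.mod_one] at h1 h2
  rw [h1, h2]

-- pvBMinPer items n p (with n = length, p ≤ n) is the least period in [p, n].
theorem pvBMinPer_spec (items : List String) (p : Nat) (hpn : p ≤ items.length) :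
    p ≤ pvBMinPer items items.length p ∧ pvBMinPer items items.length p ≤ items.length ∧
      List.HasPeriod items (pvBMinPer items items.length p) ∧
      ∀ j, p ≤ j → j < pvBMinPer items items.length p → ¬ List.HasPeriod items j := by
  generalize hk : items.length - p = k
  induction k generalizing p with
  | zero =>
    have hp : p = items.length := by omega
    rw [pvBMinPer]
    have : ¬ (p < items.length ∧ ¬ pvCheckB items items.length p = true) := by
      intro h; omega
    rw [dif_neg this]
    exact ⟨le_refl _, hpn, by rw [hp]; exact List.hasPeriod_of_length_le _ _ (le_refl _),
      fun j h1 h2 => absurd (lt_of_le_of_lt h1 h2) (lt_irrefl p)⟩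
  | succ k ih =>
    rw [pvBMinPer]
    by_cases hc : p < items.length ∧ ¬ pvCheckB items items.length p = true
    · rw [dif_pos hc]
      have hnper : ¬ List.HasPeriod items p := by
        intro hper
        exact hc.2 ((pvCheckB_iff_hasPeriod items p).mpr hper)
      obtain ⟨h1, h2, h3, h4⟩ := ih (p + 1) (by omega) (by omega)
      refine ⟨by omega, h2, h3, fun j hj1 hj2 => ?_⟩
      by_cases hjp : j = p
      · rw [hjp]; exact hnper
      · exact h4 j (by omega) hj2
    · rw [dif_neg hc]
      refine ⟨le_refl _, hpn, ?_,
        fun j h1 h2 => absurd (lt_of_le_of_lt h1 h2) (lt_irrefl p)⟩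
      by_cases hpl : p < items.length
      · have heq : pvCheckB items items.length p = true := by
          by_contra hne
          exact hc ⟨hpl, hne⟩
        exact (pvCheckB_iff_hasPeriod items p).mp heq
      · have : p = items.length := by omega
        rw [this]; exact List.hasPeriod_of_length_le _ _ (le_refl _)

-- pvAFind on range' a m: none when no candidate hits
theorem pvAFind_none (items : List String) (n : Nat) :
    ∀ m a, (∀ j, a ≤ j → j < a + m → ¬ (n % j = 0 ∧ pvCheckA items n j = true)) →
      pvAFind items n (List.range' a m) = none := by
  intro m
  induction m with
  | zero => intro a _; rfl
  | succ m ih =>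
    intro a h
    rw [List.range'_succ, pvAFind]
    have ha := h a (le_refl _) (by omega)
    by_cases h1 : n % a ≠ 0
    · rw [if_pos h1]; exact ih (a + 1) (fun j hj1 hj2 => h j (by omega) (by omega))
    · rw [if_neg h1]
      have h2 : ¬ pvCheckA items n a = true := fun hc => ha ⟨by omega, hc⟩
      rw [if_neg h2]
      exact ih (a + 1) (fun j hj1 hj2 => h j (by omega) (by omega))

-- pvAFind on range' a m: the first hit q gives items[:q]
theorem pvAFind_some (items : List String) (n : Nat) :
    ∀ m a q, a ≤ q → q < a + m → (n % q = 0 ∧ pvCheckA items n q = true) →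
      (∀ j, a ≤ j → j < q → ¬ (n % j = 0 ∧ pvCheckA items n j = true)) →
      pvAFind items n (List.range' a m) =
        some (PySem.List.slice items none (some (q : Int))) := by
  intro m
  induction m with
  | zero => intro a q h1 h2; omega
  | succ m ih =>
    intro a q h1 h2 hq hmin
    rw [List.range'_succ, pvAFind]
    by_cases haq : a = q
    · subst haq
      rw [if_neg (by simpa using hq.1), if_pos hq.2]
    · have hna := hmin a (le_refl _) (by omega)
      by_cases h3 : n % a ≠ 0
      · rw [if_pos h3]
        exact ih (a + 1) q (by omega) (by omega) hq (fun j hj1 hj2 => hmin j (by omega) hj2)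
      · rw [if_neg h3]
        have h4 : ¬ pvCheckA items n a = true := fun hc => hna ⟨by omega, hc⟩
        rw [if_neg h4]
        exact ih (a + 1) q (by omega) (by omega) hq (fun j hj1 hj2 => hmin j (by omega) hj2)

-- pvBSmallDiv on range' a m: n when no divisor in range
theorem pvBSmallDiv_none (n : Nat) :
    ∀ m a, (∀ j, a ≤ j → j < a + m → n % j ≠ 0) →
      pvBSmallDiv n (List.range' a m) = n := by
  intro m
  induction m with
  | zero => intro a _; rfl
  | succ m ih =>
    intro a h
    rw [List.range'_succ, pvBSmallDiv]
    rw [if_neg (by simpa using h a (le_refl _) (by omega))]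
    exact ih (a + 1) (fun j hj1 hj2 => h j (by omega) (by omega))

-- pvBSmallDiv on range' a m: the first divisor d
theorem pvBSmallDiv_some (n : Nat) :
    ∀ m a d, a ≤ d → d < a + m → n % d = 0 → (∀ j, a ≤ j → j < d → n % j ≠ 0) →
      pvBSmallDiv n (List.range' a m) = d := by
  intro m
  induction m with
  | zero => intro a d h1 h2; omega
  | succ m ih =>
    intro a d h1 h2 hd hmin
    rw [List.range'_succ, pvBSmallDiv]
    by_cases had : a = d
    · subst had; rw [if_pos (by simpa using hd)]
    · rw [if_neg (by simpa using hmin a (le_refl _) (by omega))]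
      exact ih (a + 1) d (by omega) (by omega) hd (fun j hj1 hj2 => hmin j (by omega) hj2)

-- ===== VERDICT (by name: the statement is the Claim_ definition above) =====
theorem dedupe_repeated_sequence_spec : Claim_equal_dedupe_repeated_sequence := by
  intro items _
  unfold Spec_dedupe_repeated_sequence dedupe_repeated_sequence dedupe_repeated_sequence_alt
  simp only []
  by_cases h4 : items.length < 4
  · rw [if_pos h4, if_pos h4]
  · rw [if_neg h4, if_neg h4]
    set n := items.length with hn
    have hn4 : 4 ≤ n := by omega
    obtain ⟨hr1, hrn, hrper, hrmin⟩ := pvBMinPer_spec items 1 (by omega)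
    set r := pvBMinPer items n 1 with hrdef
    -- shared: what A's candidate predicate means
    by_cases hex : ∃ j, 2 ≤ j ∧ j < n / 2 + 1 ∧ n % j = 0 ∧ pvCheckA items n j = true
    · -- A finds the least hit q0
      obtain ⟨hq02, hq0lt, hq0div, hq0chk⟩ := Nat.find_spec hex
      set q0 := Nat.find hex with hq0def
      have hq0min : ∀ j, j < q0 → ¬ (2 ≤ j ∧ j < n / 2 + 1 ∧ n % j = 0 ∧ pvCheckA items n j = true) :=
        fun j hj => Nat.find_min hex hj
      have hA : pvAFind items n (List.range' 2 (n / 2 + 1 - 2)) =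
          some (PySem.List.slice items none (some (q0 : Int))) := by
        apply pvAFind_some items n _ _ q0 hq02 (by omega) ⟨hq0div, hq0chk⟩
        intro j hj1 hj2 hhit
        exact hq0min j hj2 ⟨hj1, by omega, hhit.1, hhit.2⟩
      rw [hA]
      have hq0per : List.HasPeriod items q0 :=
        (pvCheckA_iff_hasPeriod items q0 (by omega)).mp hq0chk
      -- B's p2 equals q0
      by_cases hr1' : r = 1
      · -- all items equal: every check passes, so the first hit is the first divisor
        have hper1 : List.HasPeriod items 1 := by rw [← hr1']; exact hrper
        have hall : ∀ q, 1 ≤ q → pvCheckA items n q = true := fun q hq =>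
          (pvCheckA_iff_hasPeriod items q hq).mpr (pvHasPeriod_one_all items hper1 q)
        have hsd : pvBSmallDiv n (List.range' 2 (n / 2 + 1 - 2)) = q0 := by
          apply pvBSmallDiv_some n _ _ q0 hq02 (by omega) hq0div
          intro j hj1 hj2 hjdiv
          exact hq0min j hj2 ⟨hj1, by omega, hjdiv, hall j (by omega)⟩
        rw [hr1']
        simp only [beq_self_eq_true, if_true, hsd]
        rw [if_pos (by simp [hq0div]; omega)]
      · -- r ≥ 2; show q0 = r
        have hr2 : 2 ≤ r := by omega
        have hrq0 : r ≤ q0 := by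
          by_contra hlt
          exact hrmin q0 (by omega) (by omega) hq0per
        -- Fine and Wilf: gcd r q0 is a period, so r ∣ q0 by minimality of r
        have hgcd : List.HasPeriod items (Nat.gcd r q0) := by
          apply hrper.gcd hq0per
          have : r + q0 ≤ n := by omega
          omega
        have hg1 : 0 < Nat.gcd r q0 := Nat.gcd_pos_of_pos_left q0 (by omega)
        have hgr : Nat.gcd r q0 ≤ r := Nat.le_of_dvd (by omega) (Nat.gcd_dvd_left r q0)
        have hge : Nat.gcd r q0 = r := by
          by_contra hne
          exact hrmin (Nat.gcd r q0) hg1 (by omega) hgcd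
        have hrdvd : r ∣ q0 := hge ▸ Nat.gcd_dvd_right r q0
        have hrn0 : n % r = 0 := by
          obtain ⟨k, hk⟩ := hrdvd.trans (Nat.dvd_of_mod_eq_zero hq0div)
          rw [hk]; exact Nat.mul_mod_right r k
        have hrchk : pvCheckA items n r = true :=
          (pvCheckA_iff_hasPeriod items r (by omega)).mpr hrper
        have hq0r : q0 ≤ r := by
          by_contra hgt
          exact hq0min r (by omega) ⟨hr2, by omega, hrn0, hrchk⟩
        have heq : q0 = r := by omega
        have hif : (if r == 1 then pvBSmallDiv n (List.range' 2 (n / 2 + 1 - 2)) else r) = r :=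
          if_neg (by simp; omega)
        rw [hif, if_pos (by simp [hrn0]; omega), heq]
    · -- no hit: A returns items
      have hA : pvAFind items n (List.range' 2 (n / 2 + 1 - 2)) = none := by
        apply pvAFind_none
        intro j hj1 hj2 hhit
        exact hex ⟨j, hj1, by omega, hhit.1, hhit.2⟩
      rw [hA]
      by_cases hr1' : r = 1
      · have hper1 : List.HasPeriod items 1 := by rw [← hr1']; exact hrper
        have hall : ∀ q, 1 ≤ q → pvCheckA items n q = true := fun q hq =>
          (pvCheckA_iff_hasPeriod items q hq).mpr (pvHasPeriod_one_all items hper1 q)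
        have hsd : pvBSmallDiv n (List.range' 2 (n / 2 + 1 - 2)) = n := by
          apply pvBSmallDiv_none
          intro j hj1 hj2 hjdiv
          exact hex ⟨j, hj1, by omega, hjdiv, hall j (by omega)⟩
        rw [hr1']
        simp only [beq_self_eq_true, if_true, hsd]
        rw [if_neg (by simp; omega)]
      · have hif : (if r == 1 then pvBSmallDiv n (List.range' 2 (n / 2 + 1 - 2)) else r) = r :=
          if_neg (by simp; omega)
        rw [hif]
        have hcond : ¬ ((n % r == 0 && decide (r ≤ n / 2)) = true) := by
          simp only [Bool.and_eq_true, beq_iff_eq, decide_eq_true_eq, not_and]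
          intro hrn0 hrhalf
          have hrchk : pvCheckA items n r = true :=
            (pvCheckA_iff_hasPeriod items r (by omega)).mpr hrper
          exact hex ⟨r, by omega, by omega, hrn0, hrchk⟩
        rw [if_neg hcond]
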